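-- pv_equiv track=rewrite | github.com/ohtjqkd/python_algorithm_interview_study | programmers_challenge/2021-05-13-2.py | solution
-- ===== SOURCE A (Python) =====
-- def solution(numbers):
--     answer = []
--     for n in numbers:
--         origin = n
--         exp = 0
--         while n > 0:
--             if n % 2 == 0:
--                 break
--             else:
--                 n //= 2
--                 exp += 1
--         origin += 2 ** exp
--         if exp != 0:
--             origin -= 2 ** (exp-1)
--         answer.append(origin)
--     return answer
-- ===== SOURCE B (Python) =====
-- def solution(numbers):
--     # closed-form bit arithmetic instead of the trailing-ones counting loop:
--     # for odd n > 0, n ^ (n+1) is a block of (trailing-ones-count + 1) one bits,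
--     # so ((n ^ (n+1)) + 1) // 4 == 2**(exp-1), which is what A adds in total.
--     return [n + (((n ^ (n + 1)) + 1) // 4) if n > 0 and n % 2 == 1 else n + 1
--             for n in numbers]
-- ===== Notes on version B (the rewrite author's own statement) =====
-- stated objective: simpler
-- what changed: Replaced the inner while loop that counts trailing one-bits by halving with a single closed-form bit expression per element (n ^ (n+1) isolates the trailing-ones block), turning the whole function into a one-line comprehension.
import Mathlib
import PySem

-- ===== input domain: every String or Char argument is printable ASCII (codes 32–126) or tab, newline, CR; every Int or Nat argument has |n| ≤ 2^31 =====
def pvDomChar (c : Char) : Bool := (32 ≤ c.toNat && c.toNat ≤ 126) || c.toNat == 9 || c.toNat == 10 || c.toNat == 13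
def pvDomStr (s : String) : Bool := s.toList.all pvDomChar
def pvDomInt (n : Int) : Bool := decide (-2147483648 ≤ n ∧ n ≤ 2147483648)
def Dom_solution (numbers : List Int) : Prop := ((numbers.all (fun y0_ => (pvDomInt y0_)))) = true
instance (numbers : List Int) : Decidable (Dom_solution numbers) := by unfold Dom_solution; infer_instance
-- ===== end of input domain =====

-- B replaces A's inner trailing-ones-counting while loop with a closed-form bit
-- expression per element (simpler: a one-line comprehension).


-- ===== PORT A =====
-- the while loop: while n > 0: if n % 2 == 0: break else: n //= 2; exp += 1
-- (Python's exp only ever counts up from 0, so it is carried as a Nat)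
def solLoop (n : Int) (exp : Nat) : Nat :=
  if _h : n > 0 then
    if PySem.Int.mod n 2 == 0 then exp
    else solLoop (PySem.Int.floordiv n 2) (exp + 1)
  else exp
termination_by n.toNat
decreasing_by
  rw [PySem.Int.floordiv_eq_ediv_of_pos (by omega)]
  omega

def solution (numbers : List Int) : List Int :=
  numbers.foldl (fun answer n =>
    let origin := n
    let exp := solLoop n 0
    let origin := origin + 2 ^ exp
    let origin := if exp ≠ 0 then origin - 2 ^ (exp - 1) else origin
    answer ++ [origin]) []

-- ===== PORT B =====
def solution_alt (numbers : List Int) : List Int :=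
  numbers.map (fun n =>
    if n > 0 ∧ PySem.Int.mod n 2 == 1 then
      -- Python's 'n ^ (n + 1)': both operands are nonnegative under the guard,
      -- where Python's int xor coincides with Nat xor (exact here)
      n + ((((n.toNat ^^^ (n + 1).toNat) + 1) / 4 : Nat) : Int)
    else n + 1)

-- ===== PRECONDITION & SPEC =====
def Spec_solution (numbers : List Int) (out : List Int) : Prop := out = solution_alt numbers
instance (numbers : List Int) (out : List Int) : Decidable (Spec_solution numbers out) := by unfold Spec_solution; infer_instance

-- ===== CLAIM (what is proved, stated in full; the proofs are below) =====
def Claim_equal_solution : Prop := ∀ (numbers : List Int), Dom_solution numbers → Spec_solution numbers (solution numbers)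

-- ===== LEMMAS AND PROOFS =====

-- trailing-ones count on Nat (proof-side characterisation of A's inner loop)
def tOnes (n : Nat) : Nat :=
  if n % 2 = 1 then tOnes (n / 2) + 1 else 0
termination_by n
decreasing_by omega

theorem tOnes_even (n : Nat) (h : n % 2 = 0) : tOnes n = 0 := by
  rw [tOnes]; simp [h]

theorem tOnes_odd (n : Nat) (h : n % 2 = 1) : tOnes n = tOnes (n / 2) + 1 := by
  rw [tOnes]; simp [h]

-- n ^^^ (n+1) is a solid block of (tOnes n + 1) one bits
theorem xor_succ_self (n : Nat) : n ^^^ (n + 1) = 2 ^ (tOnes n + 1) - 1 := by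
  induction n using Nat.strong_induction_on with
  | _ n ih =>
    by_cases he : n % 2 = 0
    · obtain ⟨k, rfl⟩ : ∃ k, n = 2 * k := ⟨n / 2, by omega⟩
      rw [tOnes_even _ (by omega)]
      have h := Nat.xor_bit false k true k
      simp [Nat.bit] at h
      norm_num
      omega
    · obtain ⟨k, rfl⟩ : ∃ k, n = 2 * k + 1 := ⟨n / 2, by omega⟩
      have h := Nat.xor_bit true k false (k + 1)
      simp [Nat.bit] at h
      have hk := ih k (by omega)
      rw [tOnes_odd _ (by omega), show (2 * k + 1) / 2 = k by omega,
          show 2 * k + 1 + 1 = 2 * (k + 1) by ring]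
      have hp : 2 ^ (tOnes k + 1 + 1) = 2 * 2 ^ (tOnes k + 1) := by ring
      have hpos : 0 < 2 ^ (tOnes k + 1) := Nat.two_pow_pos _
      omega

-- A's loop computes exp + tOnes n.toNat for nonnegative n
theorem solLoop_eq (m : Nat) : ∀ (n : Int) (e : Nat), 0 ≤ n → n.toNat = m →
    solLoop n e = e + tOnes n.toNat := by
  induction m using Nat.strong_induction_on with
  | _ m ih =>
    intro n e hn hm
    rw [solLoop]
    by_cases hp : n > 0
    · have h2 : PySem.Int.mod n 2 = n % 2 := PySem.Int.mod_eq_emod_of_pos (by omega)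
      have hfd : PySem.Int.floordiv n 2 = n / 2 := PySem.Int.floordiv_eq_ediv_of_pos (by omega)
      by_cases hev : n % 2 = 0
      · simp only [hp, dif_pos, h2, hev]
        rw [tOnes_even _ (by omega)]
        simp
      · have hod : n % 2 = 1 := by omega
        simp only [hp, dif_pos, h2, hfd, hod]
        norm_num
        rw [ih (n / 2).toNat (by omega) (n / 2) (e + 1) (by omega) rfl,
            tOnes_odd n.toNat (by omega)]
        have : (n / 2).toNat = n.toNat / 2 := by omega
        rw [this]
        omega
    · have h0 : n.toNat = 0 := by omega
      rw [dif_neg hp, h0, tOnes_even 0 (by omega)]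
      simp

-- per-element agreement
theorem elem_eq (n : Int) :
    (let origin := n
     let exp := solLoop n 0
     let origin := origin + 2 ^ exp
     let origin := if exp ≠ 0 then origin - 2 ^ (exp - 1) else origin
     origin)
    = (if n > 0 ∧ PySem.Int.mod n 2 == 1 then
        n + ((((n.toNat ^^^ (n + 1).toNat) + 1) / 4 : Nat) : Int)
      else n + 1) := by
  by_cases hp : 0 < n
  · have h2 : PySem.Int.mod n 2 = n % 2 := PySem.Int.mod_eq_emod_of_pos (by omega)
    by_cases hev : n % 2 = 0
    · have hl : solLoop n 0 = 0 := by
        rw [solLoop]; simp [hp, hev]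
      simp [hl, hev]
    · have hod : n % 2 = 1 := by omega
      have hnod : n.toNat % 2 = 1 := by omega
      have hl : solLoop n 0 = tOnes n.toNat := by
        rw [solLoop_eq n.toNat n 0 (by omega) rfl]; omega
      obtain ⟨e, he⟩ : ∃ e, tOnes n.toNat = e + 1 :=
        ⟨tOnes (n.toNat / 2), tOnes_odd _ hnod⟩
      have hx : n.toNat ^^^ (n + 1).toNat = 2 ^ (e + 1 + 1) - 1 := by
        have h1 : (n + 1).toNat = n.toNat + 1 := by omega
        rw [h1, xor_succ_self n.toNat, he]
      have hpow : (2:Nat) ^ (e + 1 + 1) = 2 ^ e * 4 := by ring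
      have hpos : 0 < (2:Nat) ^ e := Nat.two_pow_pos _
      have hdiv : ((n.toNat ^^^ (n + 1).toNat) + 1) / 4 = 2 ^ e := by
        rw [hx]; omega
      simp only [hl, he]
      rw [if_pos (⟨hp, by rw [h2, hod]; rfl⟩ : n > 0 ∧ (PySem.Int.mod n 2 == 1) = true), if_pos (by omega : e + 1 ≠ 0), hdiv]
      push_cast
      have : (2:Int) ^ (e + 1) = 2 ^ e * 2 := by ring
      simp only [this]
      ring
  · have hl : solLoop n 0 = 0 := by rw [solLoop]; simp [hp]
    rw [if_neg (by simp [hp])]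
    simp [hl]

theorem foldl_push (f : Int → Int) (l : List Int) (acc : List Int) :
    l.foldl (fun a n => a ++ [f n]) acc = acc ++ l.map f := by
  induction l generalizing acc with
  | nil => simp
  | cons x xs ih => simp [List.foldl, ih]

-- ===== VERDICT (by name: the statement is the Claim_ definition above) =====
theorem solution_spec : Claim_equal_solution := by
  intro numbers _
  unfold Spec_solution solution solution_alt
  rw [foldl_push]
  simp only [List.nil_append]
  exact List.map_congr_left (fun n _ => elem_eq n)
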